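-- pv_equiv track=rewrite | github.com/Yishmael/ArsatumRL | experimental/snakeformation.py | get_snake_locs
-- ===== SOURCE A (Python) =====
-- def get_snake_locs(size):
--     snake = []
--     for i in range(size):
--         if i < 4:
--             pos = (i, 0)
--             x = i
--             snake.append(pos)
--         elif 4 <= i < 6:
--             pos = (x, i-3)
--             snake.append(pos)
--     return snake
-- ===== SOURCE B (Python) =====
-- POSITIONS = [(0, 0), (1, 0), (2, 0), (3, 0), (3, 1), (3, 2)]
--
-- def get_snake_locs(size):
--     return POSITIONS[:size] if size > 0 else []
-- ===== Notes on version B (the rewrite author's own statement) =====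
-- stated objective: faster
-- what changed: Replaces the loop over range(size) with index-branch conditionals and a tracked x variable by a constant six-element table and a single prefix slice, so the work no longer grows with size.
import Mathlib
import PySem

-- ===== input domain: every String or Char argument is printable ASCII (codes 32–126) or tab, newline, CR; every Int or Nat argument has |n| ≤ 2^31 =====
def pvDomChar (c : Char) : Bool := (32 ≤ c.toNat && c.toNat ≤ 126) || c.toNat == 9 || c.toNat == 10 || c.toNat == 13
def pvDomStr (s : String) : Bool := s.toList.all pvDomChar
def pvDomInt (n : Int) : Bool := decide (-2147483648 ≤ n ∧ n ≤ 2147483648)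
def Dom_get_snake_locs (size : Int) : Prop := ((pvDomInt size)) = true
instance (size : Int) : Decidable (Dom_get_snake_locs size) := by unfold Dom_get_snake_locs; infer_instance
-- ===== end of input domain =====

-- B replaces A's loop over range(size) by a constant table and a prefix slice (objective: simpler).

-- ===== PORT A =====
-- loop state: (snake, x); x is initialised to 0 but in Python it is always
-- assigned (at i = 0..3) before the elif branch (i ≥ 4) ever reads it.
def get_snake_locs (size : Int) : List (Int × Int) :=
  ((PySem.List.pyRange 0 size 1).foldl
    (fun (st : List (Int × Int) × Int) i =>
      if i < 4 then (st.1 ++ [(i, 0)], i)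
      else if 4 ≤ i ∧ i < 6 then (st.1 ++ [(st.2, i - 3)], st.2)
      else st) ([], 0)).1

-- ===== PORT B =====
def snakePositions : List (Int × Int) := [(0, 0), (1, 0), (2, 0), (3, 0), (3, 1), (3, 2)]

def get_snake_locs_alt (size : Int) : List (Int × Int) :=
  if 0 < size then snakePositions.take size.toNat else []

-- ===== PRECONDITION & SPEC =====
def Spec_get_snake_locs (size : Int) (out : List (Int × Int)) : Prop := out = get_snake_locs_alt size
instance (size : Int) (out : List (Int × Int)) : Decidable (Spec_get_snake_locs size out) := by unfold Spec_get_snake_locs; infer_instance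

-- ===== CLAIM (what is proved, stated in full; the proofs are below) =====
def Claim_equal_get_snake_locs : Prop := ∀ (size : Int), Dom_get_snake_locs size → Spec_get_snake_locs size (get_snake_locs size)

-- ===== LEMMAS AND PROOFS =====

-- the value of the Python variable x after the loop has processed i = 0 .. n-1
def snakeX (n : Nat) : Int := if n = 0 then 0 else min ((n : Int) - 1) 3

lemma snake_fold_inv (n : Nat) :
    (PySem.List.pyRange 0 (n : Int) 1).foldl
      (fun (st : List (Int × Int) × Int) i =>
        if i < 4 then (st.1 ++ [(i, 0)], i)
        else if 4 ≤ i ∧ i < 6 then (st.1 ++ [(st.2, i - 3)], st.2)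
        else st) ([], 0)
    = (snakePositions.take n, snakeX n) := by
  induction n with
  | zero => simp [PySem.List.pyRange_one_eq_nil, snakeX, snakePositions]
  | succ n ih =>
    have h : (((n : Nat) + 1 : Nat) : Int) = (n : Int) + 1 := by push_cast; ring
    rw [h, PySem.List.pyRange_one_succ_right (by positivity), List.foldl_append, ih]
    simp only [List.foldl]
    by_cases h6 : n < 6
    · interval_cases n <;> simp [snakeX, snakePositions]
    · have h1 : ¬ ((n : Int) < 4) := by omega
      have h2 : ¬ (4 ≤ (n : Int) ∧ (n : Int) < 6) := by omega
      rw [if_neg h1, if_neg h2]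
      have ht : snakePositions.take n = snakePositions.take (n + 1) := by
        rw [List.take_of_length_le (by simp [snakePositions]; omega),
            List.take_of_length_le (by simp [snakePositions]; omega)]
      rw [ht]
      simp [snakeX]
      omega

-- ===== VERDICT (by name: the statement is the Claim_ definition above) =====
theorem get_snake_locs_spec : Claim_equal_get_snake_locs := by
  intro size _
  unfold Spec_get_snake_locs get_snake_locs get_snake_locs_alt
  by_cases hs : 0 < size
  · have : size = ((size.toNat : Nat) : Int) := by omega
    rw [this, snake_fold_inv, if_pos (by omega)]
    simp
    omega
  · rw [PySem.List.pyRange_one_eq_nil (by omega), if_neg hs]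
    simp
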